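-- pv_equiv track=rewrite | github.com/Leapense/problems | 29570번: Приготовление сэндвича/Приготовление сэндвича.py | intersection_area
-- ===== SOURCE A (Python) =====
-- def intersection_area(rects):
--     if not rects:
--         return 0
--     x1 = max(rect[0] for rect in rects)
--     y1 = max(rect[1] for rect in rects)
--     x2 = min(rect[2] for rect in rects)
--     y2 = min(rect[3] for rect in rects)
--
--     if x1 < x2 and y1 < y2:
--         return (x2 - x1) * (y2 - y1)
--     else:
--         return 0
-- ===== SOURCE B (Python) =====
-- def intersection_area(rects):
--     # Coordinate-compression grid sweep: split the plane into cells by all x- and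
--     # y-edges, and sum the areas of the cells contained in every rectangle.
--     xs = sorted({r[0] for r in rects} | {r[2] for r in rects})
--     ys = sorted({r[1] for r in rects} | {r[3] for r in rects})
--     area = 0
--     for lo, hi in zip(xs, xs[1:]):
--         for bo, to in zip(ys, ys[1:]):
--             if all(r[0] <= lo and hi <= r[2] and r[1] <= bo and to <= r[3] for r in rects):
--                 area += (hi - lo) * (to - bo)
--     return area
-- ===== Notes on version B (the rewrite author's own statement) =====
-- stated objective: alternative
-- what changed: Replaces the max/min reduction to a single clipped box with a coordinate-compression grid sweep: the plane is partitioned into cells by all rectangle edges and the areas of the cells lying inside every rectangle are summed (no guard or final positivity test needed).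
import Mathlib
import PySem

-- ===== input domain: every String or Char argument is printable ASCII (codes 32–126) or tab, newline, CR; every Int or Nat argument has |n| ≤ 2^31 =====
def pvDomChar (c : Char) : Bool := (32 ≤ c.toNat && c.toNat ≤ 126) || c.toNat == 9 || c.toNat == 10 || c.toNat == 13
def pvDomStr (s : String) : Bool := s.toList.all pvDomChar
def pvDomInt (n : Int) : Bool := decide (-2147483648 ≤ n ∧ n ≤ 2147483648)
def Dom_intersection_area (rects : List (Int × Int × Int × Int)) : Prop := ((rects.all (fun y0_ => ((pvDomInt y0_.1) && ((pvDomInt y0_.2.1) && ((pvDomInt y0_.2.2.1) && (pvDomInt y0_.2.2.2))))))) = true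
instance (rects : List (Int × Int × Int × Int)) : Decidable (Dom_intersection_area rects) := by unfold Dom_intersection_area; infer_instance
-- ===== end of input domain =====

-- B replaces A's clipped-box max/min reduction by a coordinate-compression grid sweep
-- (sum the areas of the grid cells contained in every rectangle): a different algorithm, not faster.

-- ===== PORT A =====
-- Python max(gen)/min(gen) over a nonempty sequence: fold of max/min over the mapped values.
def intersection_area (rects : List (Int × Int × Int × Int)) : Int :=
  match rects with
  | [] => 0
  | r :: rs =>
    let x1 := (rs.map (fun t => t.1)).foldl max r.1
    let y1 := (rs.map (fun t => t.2.1)).foldl max r.2.1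
    let x2 := (rs.map (fun t => t.2.2.1)).foldl min r.2.2.1
    let y2 := (rs.map (fun t => t.2.2.2)).foldl min r.2.2.2
    if x1 < x2 ∧ y1 < y2 then (x2 - x1) * (y2 - y1) else 0

-- ===== PORT B =====
def intersection_area_alt (rects : List (Int × Int × Int × Int)) : Int :=
  let xs := PySem.List.sorted
    (PySem.Set.union (PySem.Set.ofList (rects.map (fun r => r.1)))
                     (PySem.Set.ofList (rects.map (fun r => r.2.2.1)))) (fun v => v) false
  let ys := PySem.List.sorted
    (PySem.Set.union (PySem.Set.ofList (rects.map (fun r => r.2.1)))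
                     (PySem.Set.ofList (rects.map (fun r => r.2.2.2)))) (fun v => v) false
  (xs.zip (PySem.List.slice xs (some 1) none)).foldl (fun area p =>
    (ys.zip (PySem.List.slice ys (some 1) none)).foldl (fun area q =>
      if rects.all (fun r =>
          decide (r.1 ≤ p.1) && decide (p.2 ≤ r.2.2.1) &&
          decide (r.2.1 ≤ q.1) && decide (q.2 ≤ r.2.2.2))
      then area + (p.2 - p.1) * (q.2 - q.1) else area) area) 0

-- ===== PRECONDITION & SPEC =====
def Spec_intersection_area (rects : List (Int × Int × Int × Int)) (out : Int) : Prop := out = intersection_area_alt rects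
instance (rects : List (Int × Int × Int × Int)) (out : Int) : Decidable (Spec_intersection_area rects out) := by unfold Spec_intersection_area; infer_instance

-- ===== CLAIM (what is proved, stated in full; the proofs are below) =====
def Claim_equal_intersection_area : Prop := ∀ (rects : List (Int × Int × Int × Int)), Dom_intersection_area rects → Spec_intersection_area rects (intersection_area rects)

-- ===== LEMMAS AND PROOFS =====

-- 'if c: acc += w' loops are sums.
theorem foldl_ite_add {α : Type} (l : List α) (a : Int) (c : α → Prop) [DecidablePred c] (w : α → Int) :
    l.foldl (fun acc x => if c x then acc + w x else acc) a
      = a + (l.map (fun x => if c x then w x else 0)).sum := by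
  induction l generalizing a with
  | nil => simp
  | cons x t ih =>
    by_cases h : c x
    · simp only [List.foldl_cons, List.map_cons, List.sum_cons, if_pos h, ih]
      ring
    · simp only [List.foldl_cons, List.map_cons, List.sum_cons, if_neg h, ih]
      ring

-- running max / min bounds
theorem foldl_max_le_iff (l : List Int) (i c : Int) :
    l.foldl max i ≤ c ↔ i ≤ c ∧ ∀ v ∈ l, v ≤ c := by
  constructor
  · intro h
    exact ⟨le_trans (PySem.List.le_foldl_max l i).1 h,
           fun v hv => le_trans ((PySem.List.le_foldl_max l i).2 v hv) h⟩
  · rintro ⟨h1, h2⟩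
    rcases PySem.List.foldl_max_mem l i with h | h
    · omega
    · exact h2 _ h

theorem le_foldl_min_iff (l : List Int) (i c : Int) :
    c ≤ l.foldl min i ↔ c ≤ i ∧ ∀ v ∈ l, c ≤ v := by
  constructor
  · intro h
    exact ⟨le_trans h (PySem.List.foldl_min_le l i).1,
           fun v hv => le_trans h ((PySem.List.foldl_min_le l i).2 v hv)⟩
  · rintro ⟨h1, h2⟩
    rcases PySem.List.foldl_min_mem l i with h | h
    · omega
    · exact h2 _ h

-- the double sum over a product grid factorises when the condition does
theorem sum_sum_factor (P Q : List (Int × Int)) (c d : Int × Int → Prop)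
    [DecidablePred c] [DecidablePred d] (f g : Int × Int → Int) :
    (P.map (fun p => (Q.map (fun q => if c p ∧ d q then f p * g q else 0)).sum)).sum
      = (P.map (fun p => if c p then f p else 0)).sum
        * (Q.map (fun q => if d q then g q else 0)).sum := by
  induction P with
  | nil => simp
  | cons p P ih =>
    simp only [List.map_cons, List.sum_cons, ih, add_mul]
    congr 1
    by_cases h : c p
    · simp only [h, if_true, true_and]
      rw [← List.sum_map_mul_left]
      congr 1
      apply List.map_congr_left
      intro q _
      by_cases hq : d q <;> simp [hq]
    · simp [h]

-- in a strictly increasing list, each zipped adjacent pair increases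
theorem adj_lt (xs : List Int) (h : xs.Pairwise (· < ·)) :
    ∀ p ∈ xs.zip xs.tail, p.1 < p.2 := by
  induction xs with
  | nil => simp
  | cons x t ih =>
    cases t with
    | nil => simp
    | cons y t' =>
      intro p hp
      rcases List.mem_cons.1 hp with rfl | hp
      · exact (List.pairwise_cons.1 h).1 y (by simp)
      · exact ih (List.pairwise_cons.1 h).2 p hp

-- empty selection: no cell fits in an empty x-range
theorem tele_zero (X1 X2 : Int) (hlt : X2 < X1) (xs : List Int) (h : xs.Pairwise (· < ·)) :
    ((xs.zip xs.tail).map (fun p => if X1 ≤ p.1 ∧ p.2 ≤ X2 then p.2 - p.1 else 0)).sum = 0 := by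
  apply List.sum_eq_zero
  intro v hv
  simp only [List.mem_map] at hv
  obtain ⟨p, hp, rfl⟩ := hv
  have := adj_lt xs h p hp
  have : ¬ (X1 ≤ p.1 ∧ p.2 ≤ X2) := by omega
  simp [this]

-- telescoping with the lower condition dropped (head is the lower bound)
theorem tele_upper (X2 : Int) (t : List Int) : ∀ (x : Int), (x :: t).Pairwise (· < ·) →
    X2 ∈ x :: t →
    (((x :: t).zip t).map (fun p => if p.2 ≤ X2 then p.2 - p.1 else 0)).sum = X2 - x := by
  induction t with
  | nil =>
    intro x _ hm
    simp at hm
    simp [hm]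
  | cons y t' ih =>
    intro x hp hm
    have hxy := (List.pairwise_cons.1 hp).1
    have hpt := (List.pairwise_cons.1 hp).2
    rcases List.mem_cons.1 hm with rfl | hm'
    · -- X2 = x: every upper edge exceeds X2
      have hz : (((y :: t').zip t').map (fun p => if p.2 ≤ X2 then p.2 - p.1 else 0)).sum = 0 := by
        apply List.sum_eq_zero
        intro v hv
        simp only [List.mem_map] at hv
        obtain ⟨p, hpmem, rfl⟩ := hv
        have h2 : p.2 ∈ t' := (List.of_mem_zip hpmem).2
        have : X2 < p.2 := hxy p.2 (by simp [h2])
        have : ¬ p.2 ≤ X2 := by omega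
        simp [this]
      have hyx : ¬ y ≤ X2 := by have := hxy y (by simp); omega
      simp only [List.zip_cons_cons, List.map_cons, List.sum_cons]
      rw [if_neg hyx, hz]
      omega
    · have hy2 : y ≤ X2 := by
        rcases List.mem_cons.1 hm' with rfl | hm'' 
        · omega
        · exact le_of_lt ((List.pairwise_cons.1 hpt).1 X2 hm'')
      have := ih y hpt hm'
      simp only [List.zip_cons_cons, List.map_cons, List.sum_cons] at this ⊢
      rw [if_pos hy2]
      omega

-- the main telescoping identity
theorem tele_main (X1 X2 : Int) : ∀ (xs : List Int), xs.Pairwise (· < ·) →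
    X1 ∈ xs → X2 ∈ xs → X1 ≤ X2 →
    ((xs.zip xs.tail).map (fun p => if X1 ≤ p.1 ∧ p.2 ≤ X2 then p.2 - p.1 else 0)).sum
      = X2 - X1 := by
  intro xs
  induction xs with
  | nil => simp
  | cons x t ih =>
    intro hp h1 h2 hle
    rcases List.mem_cons.1 h1 with rfl | h1t
    · -- X1 = x is the head: drop the lower condition
      have hcong : ((X1 :: t).zip t).map (fun p => if X1 ≤ p.1 ∧ p.2 ≤ X2 then p.2 - p.1 else 0)
          = ((X1 :: t).zip t).map (fun p => if p.2 ≤ X2 then p.2 - p.1 else 0) := by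
        apply List.map_congr_left
        intro p hpmem
        have h1m : p.1 ∈ X1 :: t := (List.of_mem_zip hpmem).1
        have hx1 : X1 ≤ p.1 := by
          rcases List.mem_cons.1 h1m with rfl | hm
          · omega
          · exact le_of_lt ((List.pairwise_cons.1 hp).1 p.1 hm)
        simp [hx1]
      simpa [hcong] using tele_upper X2 t X1 hp h2
    · -- the head is strictly below X1: its cell is not selected
      have hx1 : x < X1 := (List.pairwise_cons.1 hp).1 X1 h1t
      cases t with
      | nil => simp at h1t
      | cons y t' =>
        have h2t : X2 ∈ y :: t' := by
          rcases List.mem_cons.1 h2 with rfl | hm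
          · omega
          · exact hm
        have hcond : ¬ (X1 ≤ x ∧ y ≤ X2) := by omega
        have := ih (List.pairwise_cons.1 hp).2 h1t h2t hle
        simp only [List.zip_cons_cons, List.map_cons, List.sum_cons, List.tail_cons] at this ⊢
        rw [if_neg hcond]
        omega

-- sorted(set(a) | set(b)) is sorted(set(a ++ b))
theorem union_ofList {α : Type} [BEq α] [LawfulBEq α] (a b : List α) :
    PySem.Set.union (PySem.Set.ofList a) (PySem.Set.ofList b) = PySem.Set.ofList (a ++ b) := by
  show PySem.Set.update (PySem.Set.ofList a) (PySem.Set.ofList b) = _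
  rw [PySem.Set.update_eq_append_filter, PySem.Set.ofList_ofList,
      PySem.Set.ofList_append, PySem.Set.update_eq_append_filter]

-- the membership test against every rectangle is the test against the clipped box
theorem all_cond_eq (r : Int × Int × Int × Int) (rs : List (Int × Int × Int × Int)) (p q : Int × Int) :
    ((r :: rs).all (fun t =>
        decide (t.1 ≤ p.1) && decide (p.2 ≤ t.2.2.1) &&
        decide (t.2.1 ≤ q.1) && decide (q.2 ≤ t.2.2.2)))
      = decide (((rs.map (fun t => t.1)).foldl max r.1 ≤ p.1
                  ∧ p.2 ≤ (rs.map (fun t => t.2.2.1)).foldl min r.2.2.1)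
               ∧ ((rs.map (fun t => t.2.1)).foldl max r.2.1 ≤ q.1
                  ∧ q.2 ≤ (rs.map (fun t => t.2.2.2)).foldl min r.2.2.2)) := by
  rw [Bool.eq_iff_iff]
  simp only [List.all_eq_true, List.mem_cons, Bool.and_eq_true, decide_eq_true_eq,
    foldl_max_le_iff, le_foldl_min_iff, List.forall_mem_map]
  constructor
  · intro h
    refine ⟨⟨⟨(h r (Or.inl rfl)).1.1.1, fun t ht => (h t (Or.inr ht)).1.1.1⟩,
            (h r (Or.inl rfl)).1.1.2, fun t ht => (h t (Or.inr ht)).1.1.2⟩,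
           ⟨(h r (Or.inl rfl)).1.2, fun t ht => (h t (Or.inr ht)).1.2⟩,
           (h r (Or.inl rfl)).2, fun t ht => (h t (Or.inr ht)).2⟩
  · rintro ⟨⟨⟨h1, h1'⟩, h2, h2'⟩, ⟨h3, h3'⟩, h4, h4'⟩ t ht
    rcases ht with rfl | ht
    · exact ⟨⟨⟨h1, h2⟩, h3⟩, h4⟩
    · exact ⟨⟨⟨h1' t ht, h2' t ht⟩, h3' t ht⟩, h4' t ht⟩

-- ===== VERDICT (by name: the statement is the Claim_ definition above) =====
theorem intersection_area_spec : Claim_equal_intersection_area := by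
  intro rects _
  unfold Spec_intersection_area
  cases rects with
  | nil => decide
  | cons r rs =>
    simp only [intersection_area, intersection_area_alt]
    rw [union_ofList, union_ofList, PySem.List.slice_from_one, PySem.List.slice_from_one]
    simp only [all_cond_eq, decide_eq_true_eq]
    simp only [foldl_ite_add]
    set X1 := (rs.map (fun t => t.1)).foldl max r.1 with hX1
    set Y1 := (rs.map (fun t => t.2.1)).foldl max r.2.1 with hY1
    set X2 := (rs.map (fun t => t.2.2.1)).foldl min r.2.2.1 with hX2
    set Y2 := (rs.map (fun t => t.2.2.2)).foldl min r.2.2.2 with hY2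
    set Lx := (r :: rs).map (fun t => t.1) ++ (r :: rs).map (fun t => t.2.2.1) with hLx
    set Ly := (r :: rs).map (fun t => t.2.1) ++ (r :: rs).map (fun t => t.2.2.2) with hLy
    set xs := PySem.List.sorted (PySem.Set.ofList Lx) (fun v => v) false with hxs
    set ys := PySem.List.sorted (PySem.Set.ofList Ly) (fun v => v) false with hys
    -- loops to sums
    rw [PySem.List.foldl_add, zero_add]
    rw [sum_sum_factor (xs.zip xs.tail) (ys.zip ys.tail)
          (fun p => X1 ≤ p.1 ∧ p.2 ≤ X2) (fun q => Y1 ≤ q.1 ∧ q.2 ≤ Y2)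
          (fun p => p.2 - p.1) (fun q => q.2 - q.1)]
    -- the sorted edge lists are strictly increasing and contain the box bounds
    have hpx : xs.Pairwise (· < ·) := PySem.List.sorted_ofList_pairwise_lt Lx
    have hpy : ys.Pairwise (· < ·) := PySem.List.sorted_ofList_pairwise_lt Ly
    have hmem : ∀ (v : Int), v ∈ Lx → v ∈ xs := by
      intro v hv
      rw [hxs, PySem.List.mem_sorted, PySem.Set.mem_ofList]
      exact hv
    have hmemy : ∀ (v : Int), v ∈ Ly → v ∈ ys := by
      intro v hv
      rw [hys, PySem.List.mem_sorted, PySem.Set.mem_ofList]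
      exact hv
    have hX1m : X1 ∈ xs := by
      apply hmem
      rw [hLx]
      apply List.mem_append_left
      rcases PySem.List.foldl_max_mem (rs.map (fun t => t.1)) r.1 with h | h
      · rw [hX1, h]; exact List.mem_map_of_mem (l := r :: rs) (List.mem_cons_self)
      · rw [hX1]
        simp only [List.mem_map] at h ⊢
        obtain ⟨t, ht, hte⟩ := h
        exact ⟨t, List.mem_cons_of_mem r ht, hte⟩
    have hX2m : X2 ∈ xs := by
      apply hmem
      rw [hLx]
      apply List.mem_append_right
      rcases PySem.List.foldl_min_mem (rs.map (fun t => t.2.2.1)) r.2.2.1 with h | h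
      · rw [hX2, h]; exact List.mem_map_of_mem (l := r :: rs) (List.mem_cons_self)
      · rw [hX2]
        simp only [List.mem_map] at h ⊢
        obtain ⟨t, ht, hte⟩ := h
        exact ⟨t, List.mem_cons_of_mem r ht, hte⟩
    have hY1m : Y1 ∈ ys := by
      apply hmemy
      rw [hLy]
      apply List.mem_append_left
      rcases PySem.List.foldl_max_mem (rs.map (fun t => t.2.1)) r.2.1 with h | h
      · rw [hY1, h]; exact List.mem_map_of_mem (l := r :: rs) (List.mem_cons_self)
      · rw [hY1]
        simp only [List.mem_map] at h ⊢
        obtain ⟨t, ht, hte⟩ := h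
        exact ⟨t, List.mem_cons_of_mem r ht, hte⟩
    have hY2m : Y2 ∈ ys := by
      apply hmemy
      rw [hLy]
      apply List.mem_append_right
      rcases PySem.List.foldl_min_mem (rs.map (fun t => t.2.2.2)) r.2.2.2 with h | h
      · rw [hY2, h]; exact List.mem_map_of_mem (l := r :: rs) (List.mem_cons_self)
      · rw [hY2]
        simp only [List.mem_map] at h ⊢
        obtain ⟨t, ht, hte⟩ := h
        exact ⟨t, List.mem_cons_of_mem r ht, hte⟩
    -- evaluate the two one-dimensional sums
    have hSx : ((xs.zip xs.tail).map (fun p => if X1 ≤ p.1 ∧ p.2 ≤ X2 then p.2 - p.1 else 0)).sum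
        = if X1 < X2 then X2 - X1 else 0 := by
      rcases lt_trichotomy X1 X2 with h | h | h
      · rw [tele_main X1 X2 xs hpx hX1m hX2m (le_of_lt h), if_pos h]
      · rw [tele_main X1 X2 xs hpx hX1m hX2m (le_of_eq h), if_neg (by omega)]
        omega
      · rw [tele_zero X1 X2 h xs hpx, if_neg (by omega)]
    have hSy : ((ys.zip ys.tail).map (fun q => if Y1 ≤ q.1 ∧ q.2 ≤ Y2 then q.2 - q.1 else 0)).sum
        = if Y1 < Y2 then Y2 - Y1 else 0 := by
      rcases lt_trichotomy Y1 Y2 with h | h | h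
      · rw [tele_main Y1 Y2 ys hpy hY1m hY2m (le_of_lt h), if_pos h]
      · rw [tele_main Y1 Y2 ys hpy hY1m hY2m (le_of_eq h), if_neg (by omega)]
        omega
      · rw [tele_zero Y1 Y2 h ys hpy, if_neg (by omega)]
    rw [hSx, hSy]
    by_cases h1 : X1 < X2 <;> by_cases h2 : Y1 < Y2 <;> simp [h1, h2]
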